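-- pv_equiv track=rewrite | github.com/minhazabedin53/Olympics-Data-Cleaning-Visualization | project.py | format_athlete_name
-- ===== SOURCE A (Python) =====
-- def format_athlete_name(name: str) -> str:
--     """
--     Normalize a raw name string into 'First Last' formatting by applying
--     consistent casing rules. This helper ensures names from multiple data
--     sources follow a unified style needed for duplicate detection and clean
--     output files.
--
--     Behavior
--     --------
--     - Converts the entire string to lowercase first.
--     - Splits the name into words and capitalizes the first letter of each word.
--     - Handles simple hyphenated name parts by capitalizing each segment
--       (e.g., 'van-der' → 'Van-Der').
--     - Removes leading/trailing whitespace and returns an empty string if the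
--       input is missing or blank.
--
--     Parameters
--     ----------
--     name : str
--         The raw name text (may include lowercase, uppercase, or mixed case,
--         and optional hyphens).
--
--     Returns
--     -------
--     str
--         The normalized name in 'First Last' style. Returns "" if no valid name
--         content is provided.
--
--     Notes
--     -----
--     - This does not attempt to reorder names; it only fixes capitalization.
--     - Used primarily by normalize_paris_name() to enforce uniform formatting
--       after name matching or flipping logic.
--     """
--
--     name = (name or "").strip()
--     if not name:
--         return ""
--
--     words = name.lower().split()
--     formatted_words = []
--     for w in words:
--         # Handle hyphenated parts inside a word
--         parts = w.split("-")
--         parts = [p[:1].upper() + p[1:] if p else "" for p in parts]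
--         formatted_words.append("-".join(parts))
--     return " ".join(formatted_words)
-- ===== SOURCE B (Python) =====
-- def format_athlete_name(name: str) -> str:
--     # One-pass character scan: collapse whitespace runs to single separators,
--     # uppercase the first char of each word/hyphen segment, lowercase the rest.
--     out = []
--     gap = False   # whitespace seen since last emitted char
--     cap = True    # next emitted non-hyphen char starts a segment
--     for c in (name or ""):
--         if c in " \t\n\r\x0b\x0c":
--             gap = True
--             cap = True
--         else:
--             if gap and out:
--                 out.append(" ")
--             gap = False
--             if c == "-":
--                 out.append("-")
--                 cap = True
--             else:
--                 out.append(c.upper() if cap else c.lower())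
--                 cap = False
--     return "".join(out)
-- ===== Notes on version B (the rewrite author's own statement) =====
-- stated objective: alternative
-- what changed: A lowercases, splits on whitespace, sub-splits every word on hyphens, capitalizes each segment and joins twice; B is a single left-to-right character scan with a gap/capitalize flag pair that collapses whitespace and fixes each character's case in one pass, building the result once with no intermediate word/segment lists.
import Mathlib
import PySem

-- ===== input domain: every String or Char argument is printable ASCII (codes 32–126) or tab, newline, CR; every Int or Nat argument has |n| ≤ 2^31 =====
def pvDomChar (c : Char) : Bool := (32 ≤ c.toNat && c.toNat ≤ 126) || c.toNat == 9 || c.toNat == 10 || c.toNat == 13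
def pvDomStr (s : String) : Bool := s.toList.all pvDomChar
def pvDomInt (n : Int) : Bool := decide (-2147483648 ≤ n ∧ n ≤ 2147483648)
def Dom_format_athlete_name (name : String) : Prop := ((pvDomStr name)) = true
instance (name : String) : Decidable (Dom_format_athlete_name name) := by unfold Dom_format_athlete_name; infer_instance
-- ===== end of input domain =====

-- B replaces A's lower/split/sub-split/join pipeline by one left-to-right character scan
-- (objective: alternative single-pass structure; exact on the ASCII domain).

-- ===== PORT A =====
def format_athlete_name (name : String) : String :=
  -- name = (name or "").strip()   ((name or "") = name for a str argument)
  let nm : List Char := PySem.Chars.strip name.toList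
  -- if not name: return ""
  if nm = [] then "" else
    -- words = name.lower().split()
    let words := PySem.Chars.split₀ (PySem.Chars.lower nm)
    -- for w in words: parts = w.split("-"); parts = [p[:1].upper() + p[1:] if p else "" for p in parts];
    --                 formatted_words.append("-".join(parts))
    let fw := words.foldl (fun acc w =>
      let parts := PySem.Chars.splitOn w ['-']
      let parts := parts.map (fun p =>
        if p = [] then ([] : List Char)
        else PySem.Chars.upper (PySem.List.slice p (some 0) (some 1)) ++ PySem.List.slice p (some 1) none)
      acc ++ [PySem.Chars.join ['-'] parts]) ([] : List (List Char))
    -- return " ".join(formatted_words)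
    String.ofList (PySem.Chars.join [' '] fw)

-- ===== PORT B =====
-- one step of B's scan; state = (out, gap, cap).  c.upper()/c.lower() on a single
-- character are PySem.Chars.upperChar/lowerChar (exact on the ASCII domain).
def fanStepB (st : List Char × Bool × Bool) (c : Char) : List Char × Bool × Bool :=
  let (out, gap, cap) := st
  if c ∈ [' ', '\t', '\n', '\r', '\x0b', '\x0c'] then (out, true, true)
  else
    let out := if gap && !out.isEmpty then out ++ [' '] else out
    if c = '-' then (out ++ ['-'], false, true)
    else (out ++ [if cap then PySem.Chars.upperChar c else PySem.Chars.lowerChar c], false, false)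

def format_athlete_name_alt (name : String) : String :=
  String.ofList (name.toList.foldl fanStepB ([], false, true)).1

-- ===== PRECONDITION & SPEC =====
def Spec_format_athlete_name (name : String) (out : String) : Prop := out = format_athlete_name_alt name
instance (name : String) (out : String) : Decidable (Spec_format_athlete_name name out) := by unfold Spec_format_athlete_name; infer_instance

-- ===== CLAIM (what is proved, stated in full; the proofs are below) =====
def Claim_equal_format_athlete_name : Prop := ∀ (name : String), Dom_format_athlete_name name → Spec_format_athlete_name name (format_athlete_name name)

-- ===== LEMMAS AND PROOFS =====

-- ---- character-level facts ----
theorem fanToNatOfNat (n : Nat) (h : Nat.isValidChar n) : (Char.ofNat n).toNat = n := by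
  unfold Char.ofNat Char.toNat
  rw [dif_pos h]
  unfold Char.ofNatAux
  simp

theorem fanCharEq (c d : Char) (h : c.toNat = d.toNat) : c = d :=
  Char.ext (UInt32.toNat_inj.mp h)

theorem fanIsupperIff (c : Char) : PySem.Chars.isupper c = true ↔ 65 ≤ c.toNat ∧ c.toNat ≤ 90 := by
  simp [PySem.Chars.isupper, Char.le_def, UInt32.le_iff_toNat_le]

theorem fanIslowerIff (c : Char) : PySem.Chars.islower c = true ↔ 97 ≤ c.toNat ∧ c.toNat ≤ 122 := by
  simp [PySem.Chars.islower, Char.le_def, UInt32.le_iff_toNat_le]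

theorem fanLowerToNat (c : Char) :
    (PySem.Chars.lowerChar c).toNat = if 65 ≤ c.toNat ∧ c.toNat ≤ 90 then c.toNat + 32 else c.toNat := by
  rw [PySem.Chars.lowerChar]
  by_cases h : PySem.Chars.isupper c = true
  · rw [if_pos h, fanToNatOfNat, if_pos ((fanIsupperIff c).mp h)]
    have := (fanIsupperIff c).mp h
    exact Or.inl (by omega)
  · rw [if_neg h, if_neg (fun hc => h ((fanIsupperIff c).mpr hc))]

theorem fanUpperToNat (c : Char) :
    (PySem.Chars.upperChar c).toNat = if 97 ≤ c.toNat ∧ c.toNat ≤ 122 then c.toNat - 32 else c.toNat := by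
  rw [PySem.Chars.upperChar]
  by_cases h : PySem.Chars.islower c = true
  · rw [if_pos h, fanToNatOfNat, if_pos ((fanIslowerIff c).mp h)]
    have := (fanIslowerIff c).mp h
    exact Or.inl (by omega)
  · rw [if_neg h, if_neg (fun hc => h ((fanIslowerIff c).mpr hc))]

theorem fanIsspaceIff (c : Char) : PySem.Chars.isspace c = true ↔
    (c.toNat = 32 ∨ (9 ≤ c.toNat ∧ c.toNat ≤ 13) ∨ (28 ≤ c.toNat ∧ c.toNat ≤ 31) ∨ c.toNat = 133 ∨ c.toNat = 160
      ∨ c.toNat = 5760 ∨ (8192 ≤ c.toNat ∧ c.toNat ≤ 8202) ∨ c.toNat = 8232 ∨ c.toNat = 8233 ∨ c.toNat = 8239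
      ∨ c.toNat = 8287 ∨ c.toNat = 12288) := by
  simp [PySem.Chars.isspace]
  tauto

theorem fanIsspaceLower (c : Char) :
    PySem.Chars.isspace (PySem.Chars.lowerChar c) = PySem.Chars.isspace c := by
  have h := fanLowerToNat c
  by_cases hs : 65 ≤ c.toNat ∧ c.toNat ≤ 90
  · rw [if_pos hs] at h
    have h1 : PySem.Chars.isspace (PySem.Chars.lowerChar c) = false := by
      rw [Bool.eq_false_iff, Ne, fanIsspaceIff]; omega
    have h2 : PySem.Chars.isspace c = false := by
      rw [Bool.eq_false_iff, Ne, fanIsspaceIff]; omega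
    rw [h1, h2]
  · rw [if_neg hs] at h
    rw [fanCharEq _ _ h]

theorem fanUpperLower (c : Char) :
    PySem.Chars.upperChar (PySem.Chars.lowerChar c) = PySem.Chars.upperChar c := by
  apply fanCharEq
  rw [fanUpperToNat, fanUpperToNat, fanLowerToNat]
  by_cases hs : 65 ≤ c.toNat ∧ c.toNat ≤ 90
  · rw [if_pos hs]; split_ifs <;> omega
  · rw [if_neg hs]

theorem fanLowerHyphen (c : Char) : PySem.Chars.lowerChar c = '-' ↔ c = '-' := by
  constructor
  · intro h
    have := congrArg Char.toNat h
    rw [fanLowerToNat] at this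
    have hd : ('-' : Char).toNat = 45 := by decide
    apply fanCharEq
    rw [hd]
    split_ifs at this <;> omega
  · intro h; subst h; decide

-- under the ASCII domain, B's whitespace list test agrees with Python's str.isspace/split class
theorem fanSpaceTest (c : Char) (hc : pvDomChar c = true) :
    (c ∈ [' ', '\t', '\n', '\r', '\x0b', '\x0c']) ↔ PySem.Chars.isspace c = true := by
  have hdom : (32 ≤ c.toNat ∧ c.toNat ≤ 126) ∨ c.toNat = 9 ∨ c.toNat = 10 ∨ c.toNat = 13 := by
    simp [pvDomChar] at hc; tauto
  constructor
  · intro h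
    simp only [List.mem_cons, List.not_mem_nil, or_false] at h
    rcases h with rfl | rfl | rfl | rfl | rfl | rfl <;> decide
  · intro h
    rw [fanIsspaceIff] at h
    have : c.toNat = 32 ∨ c.toNat = 9 ∨ c.toNat = 10 ∨ c.toNat = 13 := by omega
    rcases this with h' | h' | h' | h' <;>
      [ (have : c = ' ' := fanCharEq _ _ (by rw [h']; decide));
        (have : c = '\t' := fanCharEq _ _ (by rw [h']; decide));
        (have : c = '\n' := fanCharEq _ _ (by rw [h']; decide));
        (have : c = '\r' := fanCharEq _ _ (by rw [h']; decide))] <;>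
      subst this <;> decide

-- ---- proof-side word / format machinery ----
-- P c = "c is a word character" for str.split()
def fanP (c : Char) : Bool := !(PySem.Chars.isspace c)

-- the word list of a string (what str.split() computes), direct recursion
def fanW : List Char → List (List Char)
  | [] => []
  | c :: t =>
    if PySem.Chars.isspace c then fanW t
    else (c :: t.takeWhile fanP) :: fanW (t.dropWhile fanP)
termination_by s => s.length
decreasing_by
  all_goals
    have := List.length_dropWhile_le fanP t
    simp only [List.length_cons]
    omega

-- the '-'-segment list of a word (what w.split('-') computes), direct recursion
def fanS : List Char → List (List Char)
  | [] => [[]]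
  | c :: t => if c = '-' then [] :: fanS t else (fanS t).modifyHead (c :: ·)

-- B's fused formatter of one (original-case) word
def fanF : Bool → List Char → List Char
  | _, [] => []
  | cap, c :: t =>
    if c = '-' then '-' :: fanF true t
    else (if cap then PySem.Chars.upperChar c else PySem.Chars.lowerChar c) :: fanF false t

-- capitalize first char of a segment (A's p[:1].upper() + p[1:] on a lowered segment)
def fanCap : List Char → List Char
  | [] => []
  | c :: t => PySem.Chars.upperChar c :: t

-- rendering of a word list: words formatted by fanF true, separated by single spaces
def fanRend : List (List Char) → List Char
  | [] => []
  | w :: ws => fanF true w ++ ws.flatMap (fun v => ' ' :: fanF true v)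

theorem fanS_ne_nil (v : List Char) : fanS v ≠ [] := by
  induction v with
  | nil => simp [fanS]
  | cons c t ih =>
    rw [fanS]
    split_ifs
    · simp
    · cases h : fanS t with
      | nil => exact absurd h ih
      | cons a l => simp [List.modifyHead]

-- split₀ computes fanW
theorem fanSplit0Go (s : List Char) : ∀ cur acc, PySem.Chars.split₀.go s cur acc =
    acc.reverse ++ (if cur = [] then fanW s
      else (cur.reverse ++ s.takeWhile fanP) :: fanW (s.dropWhile fanP)) := by
  induction s with
  | nil =>
    intro cur acc
    rw [PySem.Chars.split₀.go]
    by_cases h : cur = []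
    · simp [h, fanW]
    · simp [h, List.isEmpty_iff, fanW]
  | cons c rest ih =>
    intro cur acc
    rw [PySem.Chars.split₀.go]
    by_cases hsp : PySem.Chars.isspace c = true
    · rw [if_pos hsp]
      have hPc : fanP c = false := by simp [fanP, hsp]
      by_cases h : cur = []
      · rw [h]
        simp only [List.isEmpty_nil, if_pos, if_true]
        rw [ih [] acc]
        simp [fanW, hsp]
      · rw [if_neg (by simpa [List.isEmpty_iff] using h)]
        rw [ih [] (cur.reverse :: acc)]
        simp [h, List.takeWhile_cons, List.dropWhile_cons, hPc, fanW, hsp]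
    · rw [if_neg hsp]
      have hPc : fanP c = true := by simp [fanP, hsp]
      rw [ih (c :: cur) acc]
      by_cases h : cur = []
      · simp [h, fanW, hsp, List.takeWhile_cons, List.dropWhile_cons, hPc]
      · simp [h, List.takeWhile_cons, List.dropWhile_cons, hPc]

theorem fanSplit0 (s : List Char) : PySem.Chars.split₀ s = fanW s := by
  rw [PySem.Chars.split₀, fanSplit0Go]
  simp

-- splitOn _ ['-'] computes fanS
theorem fanSplitOnGo (fuel : Nat) : ∀ l cur acc, l.length < fuel →
    PySem.Chars.splitOn.go ['-'] fuel l cur acc =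
      acc.reverse ++ (fanS l).modifyHead (cur.reverse ++ ·) := by
  induction fuel with
  | zero => intro l cur acc h; omega
  | succ fuel ih =>
    intro l cur acc h
    cases l with
    | nil =>
      rw [PySem.Chars.splitOn.go]
      · simp [fanS, List.modifyHead]
      · omega
    | cons c rest =>
      rw [PySem.Chars.splitOn.go]
      by_cases hc : c = '-'
      · subst hc
        rw [if_pos (by simp [List.isPrefixOf])]
        have hdrop : List.drop ['-'].length ('-' :: rest) = rest := rfl
        rw [hdrop]
        rw [ih rest [] (cur.reverse :: acc) (by simp at h ⊢; omega)]
        cases hS : fanS rest with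
        | nil => exact absurd hS (fanS_ne_nil rest)
        | cons a l' => simp [fanS, hS, List.modifyHead]
      · rw [if_neg (by simp [List.isPrefixOf]; exact Ne.symm hc)]
        rw [ih rest (c :: cur) acc (by simp at h ⊢; omega)]
        cases hS : fanS rest with
        | nil => exact absurd hS (fanS_ne_nil rest)
        | cons a l' => simp [fanS, hc, hS, List.modifyHead]

theorem fanSplitOn (w : List Char) : PySem.Chars.splitOn w ['-'] = fanS w := by
  rw [PySem.Chars.splitOn, fanSplitOnGo _ _ _ _ (Nat.lt_succ_self _)]
  cases h : fanS w with
  | nil => exact absurd h (fanS_ne_nil w)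
  | cons a l => simp [List.modifyHead]

-- join with a single-char separator, flatMap form
theorem fanJoin (sep : Char) (f : List Char → List Char) (h : List Char) (r : List (List Char)) :
    PySem.Chars.join [sep] ((h :: r).map f) = f h ++ r.flatMap (fun p => sep :: f p) := by
  induction r generalizing h with
  | nil => simp [PySem.Chars.join_singleton]
  | cons b r' ih =>
    rw [List.map_cons, List.map_cons, PySem.Chars.join_cons_cons, ← List.map_cons]
    rw [ih b]
    simp

-- A's per-word pipeline equals B's fused formatter
theorem fanCapJoin (w : List Char) :
    (fanCap (fanS (w.map PySem.Chars.lowerChar)).headI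
        ++ (fanS (w.map PySem.Chars.lowerChar)).tail.flatMap (fun p => '-' :: fanCap p)
      = fanF true w)
    ∧ ((fanS (w.map PySem.Chars.lowerChar)).headI
        ++ (fanS (w.map PySem.Chars.lowerChar)).tail.flatMap (fun p => '-' :: fanCap p)
      = fanF false w) := by
  induction w with
  | nil => simp [fanS, fanCap, fanF]
  | cons c t ih =>
    obtain ⟨a, l', hS⟩ : ∃ a l', fanS (t.map PySem.Chars.lowerChar) = a :: l' := by
      cases h : fanS (t.map PySem.Chars.lowerChar) with
      | nil => exact absurd h (fanS_ne_nil _)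
      | cons a l' => exact ⟨a, l', rfl⟩
    rw [hS] at ih
    simp only [List.headI, List.tail] at ih
    simp only [List.map_cons]
    by_cases hc : c = '-'
    · subst hc
      have hl : PySem.Chars.lowerChar '-' = '-' := by decide
      rw [hl]
      rw [fanS, if_pos rfl, hS]
      constructor <;>
      · show fanCap [] ++ ((a :: l').flatMap (fun p => '-' :: fanCap p)) = fanF _ ('-' :: t)
        rw [fanF, if_pos rfl, List.flatMap_cons]
        simp only [fanCap, List.nil_append, List.cons_append]
        rw [← ih.1]
        rfl
    · have hl : PySem.Chars.lowerChar c ≠ '-' := fun h => hc ((fanLowerHyphen c).mp h)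
      rw [fanS, if_neg hl, hS, List.modifyHead]
      simp only [List.headI, List.tail]
      constructor
      · rw [fanF, if_neg hc]
        show fanCap (PySem.Chars.lowerChar c :: a) ++ _ = _
        rw [fanCap]
        simp only [List.cons_append]
        rw [fanUpperLower, ih.2]
        rfl
      · rw [fanF, if_neg hc]
        simp only [List.cons_append]
        rw [ih.2]
        rfl

-- fanW ignores an all-space suffix, leading spaces, lower-casing, and strip
theorem fanW_all_space (s : List Char) (h : ∀ c ∈ s, PySem.Chars.isspace c = true) : fanW s = [] := by
  induction s with
  | nil => simp [fanW]
  | cons c t ih =>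
    rw [fanW, if_pos (h c (List.mem_cons_self))]
    exact ih (fun d hd => h d (List.mem_cons_of_mem _ hd))

theorem fanTWapp (t : List Char) (ht : ∀ c ∈ t, fanP c = false) :
    ∀ u : List Char, (u ++ t).takeWhile fanP = u.takeWhile fanP
      ∧ (u ++ t).dropWhile fanP = u.dropWhile fanP ++ t := by
  intro u
  induction u with
  | nil =>
    simp only [List.nil_append, List.takeWhile_nil, List.dropWhile_nil]
    cases t with
    | nil => simp
    | cons x xs =>
      have hx : fanP x = false := ht x List.mem_cons_self
      rw [List.takeWhile_cons_of_neg (by simp [hx]), List.dropWhile_cons_of_neg (by simp [hx])]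
      simp
  | cons c u' ih =>
    by_cases hc : fanP c = true
    · rw [List.cons_append, List.takeWhile_cons_of_pos hc, List.takeWhile_cons_of_pos hc,
        List.dropWhile_cons_of_pos hc, List.dropWhile_cons_of_pos hc, ih.1, ih.2]
      simp
    · rw [List.cons_append, List.takeWhile_cons_of_neg hc, List.takeWhile_cons_of_neg hc,
        List.dropWhile_cons_of_neg hc, List.dropWhile_cons_of_neg hc]
      simp

theorem fanW_append_space (t : List Char) (ht : ∀ c ∈ t, PySem.Chars.isspace c = true) :
    ∀ u, fanW (u ++ t) = fanW u := by
  have ht' : ∀ c ∈ t, fanP c = false := fun c hc => by simp [fanP, ht c hc]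
  intro u
  induction u using fanW.induct with
  | case1 =>
    simp only [List.nil_append]
    rw [fanW_all_space t ht, fanW]
  | case2 c u' hsp ih =>
    rw [List.cons_append, fanW, if_pos hsp, ih, fanW, if_pos hsp]
  | case3 c u' hsp ih =>
    rw [List.cons_append, fanW, if_neg hsp, fanW, if_neg hsp,
      (fanTWapp t ht' u').1, (fanTWapp t ht' u').2]
    rw [ih]

theorem fanW_lstrip (s : List Char) : fanW (s.dropWhile PySem.Chars.isspace) = fanW s := by
  induction s with
  | nil => rfl
  | cons c t ih =>
    by_cases h : PySem.Chars.isspace c = true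
    · rw [List.dropWhile_cons_of_pos h, ih, fanW, if_pos h]
    · rw [List.dropWhile_cons_of_neg h]

theorem fanW_strip (s : List Char) : fanW (PySem.Chars.strip s) = fanW s := by
  rw [PySem.Chars.strip]
  have hl : fanW (PySem.Chars.lstrip s) = fanW s := by
    rw [PySem.Chars.lstrip]; exact fanW_lstrip s
  rw [← hl]
  set x := PySem.Chars.lstrip s with hx
  have hdec : x = PySem.Chars.rstrip x ++ (x.reverse.takeWhile PySem.Chars.isspace).reverse := by
    rw [PySem.Chars.rstrip]
    conv_lhs => rw [← x.reverse_reverse, ← List.takeWhile_append_dropWhile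
      (p := PySem.Chars.isspace) (l := x.reverse)]
    rw [List.reverse_append]
  have hsp : ∀ c ∈ (x.reverse.takeWhile PySem.Chars.isspace).reverse, PySem.Chars.isspace c = true := by
    intro c hc
    rw [List.mem_reverse] at hc
    exact List.mem_takeWhile_imp hc
  conv_rhs => rw [hdec]
  rw [fanW_append_space _ hsp]

theorem fanW_lower (s : List Char) :
    fanW (s.map PySem.Chars.lowerChar) = (fanW s).map (List.map PySem.Chars.lowerChar) := by
  induction s using fanW.induct with
  | case1 => simp [fanW]
  | case2 c t hsp ih =>
    rw [List.map_cons, fanW, if_pos (by rw [fanIsspaceLower]; exact hsp), ih, fanW, if_pos hsp]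
  | case3 c t hsp ih =>
    have hPf : fanP ∘ PySem.Chars.lowerChar = fanP := by
      funext d; simp [fanP, Function.comp, fanIsspaceLower]
    rw [List.map_cons, fanW, if_neg (by rw [fanIsspaceLower]; exact hsp),
      List.takeWhile_map, List.dropWhile_map, hPf, ih, fanW, if_neg hsp]
    simp

-- B's scan computes fanRend ∘ fanW
-- proof-side copy of fanStepB with the whitespace test written as isspace
def fanStepI (st : List Char × Bool × Bool) (c : Char) : List Char × Bool × Bool :=
  let (out, gap, cap) := st
  if PySem.Chars.isspace c then (out, true, true)
  else
    let out := if gap && !out.isEmpty then out ++ [' '] else out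
    if c = '-' then (out ++ ['-'], false, true)
    else (out ++ [if cap then PySem.Chars.upperChar c else PySem.Chars.lowerChar c], false, false)

theorem fanStepEq (st : List Char × Bool × Bool) (c : Char) (hc : pvDomChar c = true) :
    fanStepB st c = fanStepI st c := by
  obtain ⟨out, gap, cap⟩ := st
  rw [fanStepB, fanStepI]
  by_cases h : PySem.Chars.isspace c = true
  · rw [if_pos ((fanSpaceTest c hc).mpr h), if_pos h]
  · rw [if_neg (fun hm => h ((fanSpaceTest c hc).mp hm)), if_neg h]

theorem fanFlat (ws : List (List Char)) :
    ws.flatMap (fun v => ' ' :: fanF true v) = if ws = [] then [] else ' ' :: fanRend ws := by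
  cases ws with
  | nil => simp
  | cons v vs => simp [fanRend]

theorem fanScan (s : List Char) :
    (∀ g : Bool, (s.foldl fanStepI ([], g, true)).1 = fanRend (fanW s))
    ∧ (∀ out : List Char, out ≠ [] → (s.foldl fanStepI (out, true, true)).1
        = out ++ (if fanW s = [] then [] else ' ' :: fanRend (fanW s)))
    ∧ (∀ (out : List Char) (cap : Bool), out ≠ [] → (s.foldl fanStepI (out, false, cap)).1
        = out ++ fanF cap (s.takeWhile fanP)
            ++ (if fanW (s.dropWhile fanP) = [] then [] else ' ' :: fanRend (fanW (s.dropWhile fanP)))) := by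
  induction s with
  | nil => refine ⟨fun g => by simp [fanW, fanRend], fun out h => by simp [fanW], fun out cap h => by simp [fanW, fanF]⟩
  | cons c t ih =>
    obtain ⟨ihG0, ihG1, ihM⟩ := ih
    by_cases hsp : PySem.Chars.isspace c = true
    · have hPc : fanP c = false := by simp [fanP, hsp]
      have hstep : ∀ st : List Char × Bool × Bool, fanStepI st c = (st.1, true, true) := by
        intro st; obtain ⟨o, g, k⟩ := st; rw [fanStepI, if_pos hsp]
      refine ⟨?_, ?_, ?_⟩
      · intro g
        rw [List.foldl_cons, hstep, fanW, if_pos hsp]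
        exact ihG0 true
      · intro out h
        rw [List.foldl_cons, hstep, fanW, if_pos hsp]
        exact ihG1 out h
      · intro out cap h
        rw [List.foldl_cons, hstep,
          List.takeWhile_cons_of_neg (by simp [hPc]), List.dropWhile_cons_of_neg (by simp [hPc]),
          fanW, if_pos hsp, fanF]
        simpa using ihG1 out h
    · have hPc : fanP c = true := by simp [fanP, hsp]
      have hW : fanW (c :: t) = (c :: t.takeWhile fanP) :: fanW (t.dropWhile fanP) := by
        rw [fanW, if_neg hsp]
      refine ⟨?_, ?_, ?_⟩
      · intro g
        rw [List.foldl_cons]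
        by_cases hc : c = '-'
        · subst hc
          have : fanStepI ([], g, true) '-' = (['-'], false, true) := by
            rw [fanStepI, if_neg hsp]; simp
          rw [this, ihM ['-'] true (by simp), hW, fanRend, fanF, if_pos rfl, fanFlat]
          simp
        · have : fanStepI ([], g, true) c = ([PySem.Chars.upperChar c], false, false) := by
            rw [fanStepI, if_neg hsp]; simp [hc]
          rw [this, ihM [PySem.Chars.upperChar c] false (by simp), hW, fanRend, fanF,
            if_neg hc, fanFlat]
          simp
      · intro out h
        rw [List.foldl_cons]
        by_cases hc : c = '-'
        · subst hc
          have : fanStepI (out, true, true) '-' = (out ++ [' ', '-'], false, true) := by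
            rw [fanStepI, if_neg hsp]; simp [h]
          rw [this, ihM (out ++ [' ', '-']) true (by simp), hW,
            if_neg (List.cons_ne_nil _ _), fanRend, fanF, if_pos rfl, fanFlat]
          simp
        · have : fanStepI (out, true, true) c = (out ++ [' ', PySem.Chars.upperChar c], false, false) := by
            rw [fanStepI, if_neg hsp]; simp [h, hc]
          rw [this, ihM (out ++ [' ', PySem.Chars.upperChar c]) false (by simp), hW,
            if_neg (List.cons_ne_nil _ _), fanRend, fanF, if_neg hc, fanFlat]
          simp
      · intro out cap h
        rw [List.foldl_cons,
          List.takeWhile_cons_of_pos hPc, List.dropWhile_cons_of_pos hPc]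
        by_cases hc : c = '-'
        · subst hc
          have : fanStepI (out, false, cap) '-' = (out ++ ['-'], false, true) := by
            rw [fanStepI, if_neg hsp]; simp
          rw [this, ihM (out ++ ['-']) true (by simp), fanF, if_pos rfl]
          simp
        · have : fanStepI (out, false, cap) c
              = (out ++ [if cap then PySem.Chars.upperChar c else PySem.Chars.lowerChar c], false, false) := by
            rw [fanStepI, if_neg hsp]; simp [hc]
          rw [this, ihM _ false (by simp), fanF, if_neg hc]
          simp

theorem fanFoldB (s : List Char) (hs : ∀ c ∈ s, pvDomChar c = true) :
    (s.foldl fanStepB ([], false, true)).1 = fanRend (fanW s) := by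
  have hcongr : s.foldl fanStepB ([], false, true) = s.foldl fanStepI ([], false, true) :=
    PySem.List.foldl_congr_mem s fanStepB fanStepI ([], false, true) (fun st c hc => fanStepEq st c (hs c hc))
  rw [hcongr]
  exact (fanScan s).1 false

-- A computes fanRend ∘ fanW too
theorem fanPart (p : List Char) :
    (if p = [] then ([] : List Char)
      else PySem.Chars.upper (PySem.List.slice p (some 0) (some 1)) ++ PySem.List.slice p (some 1) none)
    = fanCap p := by
  cases p with
  | nil => simp [fanCap]
  | cons c t =>
    rw [if_neg (List.cons_ne_nil _ _)]
    have h1 : PySem.List.slice (c :: t) (some 0) (some 1) = [c] := by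
      simp [PySem.List.slice]
    have h2 : PySem.List.slice (c :: t) (some 1) none = t := by
      simp [PySem.List.slice]
    rw [h1, h2, fanCap]
    simp [PySem.Chars.upper]

theorem fanWordA (w : List Char) :
    PySem.Chars.join ['-'] ((PySem.Chars.splitOn (w.map PySem.Chars.lowerChar) ['-']).map
      (fun p => if p = [] then ([] : List Char)
        else PySem.Chars.upper (PySem.List.slice p (some 0) (some 1)) ++ PySem.List.slice p (some 1) none))
    = fanF true w := by
  rw [fanSplitOn, funext fanPart]
  obtain ⟨a, l', hS⟩ : ∃ a l', fanS (w.map PySem.Chars.lowerChar) = a :: l' := by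
    cases h : fanS (w.map PySem.Chars.lowerChar) with
    | nil => exact absurd h (fanS_ne_nil _)
    | cons a l' => exact ⟨a, l', rfl⟩
  rw [hS, fanJoin]
  have h := (fanCapJoin w).1
  rw [hS] at h
  simpa using h

theorem fanFoldA (s : List Char) : format_athlete_name (String.ofList s) = String.ofList (fanRend (fanW s)) := by
  simp only [format_athlete_name, String.toList_ofList]
  by_cases h : PySem.Chars.strip s = []
  · rw [if_pos h]
    have hall : ∀ c ∈ s, PySem.Chars.isspace c = true := by
      have hs' : s = s.takeWhile PySem.Chars.isspace ++ s.dropWhile PySem.Chars.isspace :=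
        (List.takeWhile_append_dropWhile).symm
      have hre : PySem.Chars.rstrip (PySem.Chars.lstrip s) = [] := h
      rw [PySem.Chars.rstrip, PySem.Chars.lstrip] at hre
      have : List.dropWhile PySem.Chars.isspace (List.dropWhile PySem.Chars.isspace s).reverse = [] := by
        cases hx : List.dropWhile PySem.Chars.isspace (List.dropWhile PySem.Chars.isspace s).reverse with
        | nil => rfl
        | cons a l' => rw [hx] at hre; simp at hre
      rw [List.dropWhile_eq_nil_iff] at this
      intro c hc
      conv at hc => rw [hs']
      rcases List.mem_append.mp hc with h1 | h1
      · exact List.mem_takeWhile_imp h1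
      · exact this c (List.mem_reverse.mpr h1)
    rw [fanW_all_space s hall]
    rfl
  · rw [if_neg h]
    rw [PySem.List.foldl_append_singleton_eq_map]
    rw [show PySem.Chars.lower (PySem.Chars.strip s)
        = (PySem.Chars.strip s).map PySem.Chars.lowerChar from rfl]
    rw [fanSplit0, fanW_lower, fanW_strip]
    congr 1
    rw [List.nil_append, List.map_map]
    simp only [Function.comp_def]
    rw [List.map_congr_left (fun w _ => fanWordA w)]
    cases hws : fanW s with
    | nil => simp [fanRend, PySem.Chars.join_nil]
    | cons w ws =>
      rw [fanJoin]
      rfl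

-- ===== VERDICT (by name: the statement is the Claim_ definition above) =====
theorem format_athlete_name_spec : Claim_equal_format_athlete_name := by
  intro name hdom
  unfold Spec_format_athlete_name
  have hs : ∀ c ∈ name.toList, pvDomChar c = true := by
    intro c hc
    exact List.all_eq_true.mp hdom c hc
  rw [format_athlete_name_alt, fanFoldB _ hs]
  have := fanFoldA name.toList
  rwa [String.ofList_toList] at this
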